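-- pv_equiv track=rewrite | github.com/telamonian/nppretty | nppretty/formatArray.py | _joinFormattedArrays
-- ===== SOURCE A (Python) =====
-- def _joinFormattedArrays(arrFmt, newline, squeeze, blank, gutter):
--     """Joins a list of pre-formatted arrays together and returns a single `str`.
--     """
--     # deal with edge cases
--     if len(arrFmt)==0:
--         return ''
--     elif len(arrFmt)==1:
--         return arrFmt[0]
--
--     # handle 2 or more pre-formatted arrays
--     if squeeze:
--         # just cat the 1D array representations together
--         return gutter.join(arrFmt)
--     else:
--         # split up the formatted arrays at their newline chars
--         arrFmtSplit = [arFmt.split(newline) for arFmt in arrFmt]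
--
--         # figure out the line count of the array with the most lines
--         linecount = max(len(arFmtSplit) for arFmtSplit in arrFmtSplit)
--
--         # add spaces such that each array is formatted as a rectangle, add extra lines so that all of the rectangles are the same height, then cat the arrays together line-by-line (separated by delimiterMulti)
--         arrFmtCat = newline.join(gutter.join(lines) for lines in zip(*(_formatArraySplitWiden(arFmtSplit=arFmtSplit, blank=blank, linecount=linecount) for arFmtSplit in arrFmtSplit)))
--
--         return arrFmtCat
--
-- def _formatArraySplitWiden(arFmtSplit, blank, linecount):
--     """Private func that gets iterated over as part of enjambing multiple formatted arrays side-by-side.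
--     Adds spaces such that the mutable sequence arFmtSplit (if joined by `\n`) will print as a rectangle.
--     Optionally also extends the "height" of the rectangle to match lineCount. If lineCount <= len(arFmtSplit), nothing happens.
--     """
--     width = max(len(line) for line in arFmtSplit)
--     for i in range(len(arFmtSplit)):
--         arFmtSplit[i] = arFmtSplit[i].ljust(width)
--
--     if linecount > len(arFmtSplit):
--         arFmtSplit.extend([blank*width]*(linecount - len(arFmtSplit)))
--
--     return arFmtSplit
-- ===== SOURCE B (Python) =====
-- def _joinFormattedArrays(arrFmt, newline, squeeze, blank, gutter):
--     """Row-major join: split each block once, precompute per-block widths,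
--     then emit each output row directly (no widen-then-transpose pass)."""
--     if len(arrFmt) == 0:
--         return ''
--     if len(arrFmt) == 1:
--         return arrFmt[0]
--     if squeeze:
--         return gutter.join(arrFmt)
--     splits = [a.split(newline) for a in arrFmt]
--     widths = [max(len(line) for line in s) for s in splits]
--     blanks = [blank * w for w in widths]
--     height = max(len(s) for s in splits)
--     rows = []
--     for i in range(height):
--         rows.append(gutter.join(
--             s[i].ljust(w) if i < len(s) else b
--             for s, w, b in zip(splits, widths, blanks)))
--     return newline.join(rows)
-- ===== Notes on version B (the rewrite author's own statement) =====
-- stated objective: simpler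
-- what changed: Replaces the widen-each-block-to-a-rectangle-then-transpose (zip(*...)) pass with precomputed per-block widths and a direct row-major loop that builds each output row cell-by-cell.
import Mathlib
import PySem

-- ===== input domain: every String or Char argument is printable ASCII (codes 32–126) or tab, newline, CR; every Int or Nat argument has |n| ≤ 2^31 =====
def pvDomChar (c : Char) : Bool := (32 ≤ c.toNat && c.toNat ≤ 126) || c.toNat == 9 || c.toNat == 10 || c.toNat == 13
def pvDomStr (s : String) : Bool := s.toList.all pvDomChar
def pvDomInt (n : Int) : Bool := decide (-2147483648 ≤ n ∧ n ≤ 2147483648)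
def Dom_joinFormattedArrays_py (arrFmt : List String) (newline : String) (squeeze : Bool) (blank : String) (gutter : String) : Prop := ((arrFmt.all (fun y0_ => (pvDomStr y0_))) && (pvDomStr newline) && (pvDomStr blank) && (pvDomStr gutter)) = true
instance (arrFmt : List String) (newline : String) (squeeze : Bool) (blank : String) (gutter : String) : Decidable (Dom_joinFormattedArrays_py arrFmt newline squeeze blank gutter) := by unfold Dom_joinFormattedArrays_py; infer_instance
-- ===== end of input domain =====

-- B changes the else-branch decomposition: instead of widening every split block to a
-- rectangle and transposing with zip(*...), it precomputes each block's width and emits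
-- the output rows directly (row-major). Objective: simpler/alternative, same cost.

-- ===== PORT A =====

-- s.ljust(w): pad with spaces on the right (never truncates); exact, hand-ported (no PySem ljust)
def pvLjust (s : String) (w : Nat) : String :=
  String.mk (s.toList ++ List.replicate (w - s.toList.length) ' ')

-- blank * w: string repetition; exact, hand-ported
def pvStrRepeat (blank : String) (w : Nat) : String :=
  String.mk ((List.replicate w blank.toList).flatten)

-- _formatArraySplitWiden: width = max(len(line)...), ljust every line (the in-place index
-- loop is rendered as the map it performs), then extend with blank*width rows up to linecount
def widenA (s : List String) (blank : String) (linecount : Nat) : List String :=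
  let width := s.foldl (fun m l => max m l.toList.length) 0
  let padded := s.map (fun l => pvLjust l width)
  if linecount > padded.length then
    padded ++ List.replicate (linecount - padded.length) (pvStrRepeat blank width)
  else padded

-- zip(*xss) for a nonempty list of lists: truncates to the shortest; exact, hand-ported
def pyZipStar (xss : List (List String)) : List (List String) :=
  match xss with
  | [] => []
  | x :: rest =>
    let n := rest.foldl (fun m xs => min m xs.length) x.length
    (List.range n).map (fun i => (x :: rest).map (fun xs => xs.getD i ""))

def joinFormattedArrays_py (arrFmt : List String) (newline : String) (squeeze : Bool) (blank : String) (gutter : String) : String :=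
  if arrFmt.length = 0 then ""
  else if arrFmt.length = 1 then arrFmt.headD ""   -- arrFmt[0]; exact since length = 1
  else if squeeze then PySem.Str.join gutter arrFmt
  else
    -- a.split(newline); Pre_ excludes newline = "" here (Python ValueError), so getD is never used
    let splits := arrFmt.map (fun a => (PySem.Str.split? a newline).getD [a])
    -- max(len(s) for s in splits); init 0 exact: splits is nonempty and lengths are ≥ 0
    let linecount := splits.foldl (fun m s => max m s.length) 0
    PySem.Str.join newline
      ((pyZipStar (splits.map (fun s => widenA s blank linecount))).map
        (fun row => PySem.Str.join gutter row))

-- ===== PORT B =====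

-- row cell: s[i].ljust(w) if i < len(s) else b (the precomputed blank row)
def cellB (s : List String) (w : Nat) (b : String) (i : Nat) : String :=
  if i < s.length then String.mk ((s.getD i "").toList ++ List.replicate (w - (s.getD i "").toList.length) ' ')
  else b

def joinFormattedArrays_py_alt (arrFmt : List String) (newline : String) (squeeze : Bool) (blank : String) (gutter : String) : String :=
  if arrFmt.length = 0 then ""
  else if arrFmt.length = 1 then arrFmt.headD ""
  else if squeeze then PySem.Str.join gutter arrFmt
  else
    let splits := arrFmt.map (fun a => (PySem.Str.split? a newline).getD [a])
    let widths := splits.map (fun s => s.foldl (fun m l => max m l.toList.length) 0)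
    let blanks := widths.map (fun w => String.mk ((List.replicate w blank.toList).flatten))
    let height := splits.foldl (fun m s => max m s.length) 0
    let rows := (List.range height).map
      (fun i => PySem.Str.join gutter
        (((splits.zip widths).zip blanks).map (fun swb => cellB swb.1.1 swb.1.2 swb.2 i)))
    PySem.Str.join newline rows

-- ===== PRECONDITION & SPEC =====
-- Pre_ excludes only inputs where A raises: with ≥ 2 arrays and squeeze false,
-- str.split('') raises ValueError (empty separator).
def Pre_joinFormattedArrays_py (arrFmt : List String) (newline : String) (squeeze : Bool) (blank : String) (gutter : String) : Prop :=
  arrFmt.length ≤ 1 ∨ squeeze = true ∨ newline ≠ ""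
instance (arrFmt : List String) (newline : String) (squeeze : Bool) (blank : String) (gutter : String) : Decidable (Pre_joinFormattedArrays_py arrFmt newline squeeze blank gutter) := by unfold Pre_joinFormattedArrays_py; infer_instance

def pvWitness_joinFormattedArrays_py : List String × String × Bool × String × String :=
  (["1 2", "3\n4"], "\n", false, " ", " | ")

def Spec_joinFormattedArrays_py (arrFmt : List String) (newline : String) (squeeze : Bool) (blank : String) (gutter : String) (out : String) : Prop := out = joinFormattedArrays_py_alt arrFmt newline squeeze blank gutter
instance (arrFmt : List String) (newline : String) (squeeze : Bool) (blank : String) (gutter : String) (out : String) : Decidable (Spec_joinFormattedArrays_py arrFmt newline squeeze blank gutter out) := by unfold Spec_joinFormattedArrays_py; infer_instance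

-- ===== CLAIM (what is proved, stated in full; the proofs are below) =====
def Claim_equal_joinFormattedArrays_py : Prop := ∀ (arrFmt : List String) (newline : String) (squeeze : Bool) (blank : String) (gutter : String), Dom_joinFormattedArrays_py arrFmt newline squeeze blank gutter → Pre_joinFormattedArrays_py arrFmt newline squeeze blank gutter → Spec_joinFormattedArrays_py arrFmt newline squeeze blank gutter (joinFormattedArrays_py arrFmt newline squeeze blank gutter)

-- ===== LEMMAS AND PROOFS =====

-- every element's length is ≤ the running max of lengths (PySem.List.le_foldl_max_nat)
theorem le_foldl_max_len (xs : List (List String)) :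
    ∀ s ∈ xs, s.length ≤ xs.foldl (fun m s => max m s.length) 0 :=
  (PySem.List.le_foldl_max_nat xs (fun s => s.length) 0).2

theorem length_widenA (s : List String) (blank : String) (L : Nat) (h : s.length ≤ L) :
    (widenA s blank L).length = L := by
  unfold widenA
  by_cases hc : L > (s.map (fun l => pvLjust l (s.foldl (fun m l => max m l.toList.length) 0))).length
  · simp only [if_pos hc]
    simp at hc ⊢
    omega
  · simp only [if_neg hc]
    simp at hc ⊢
    omega

-- the i-th row cell of the widened block is exactly B's cell
theorem getD_widenA (s : List String) (blank : String) (L i : Nat) (hs : s.length ≤ L) (hi : i < L) :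
    (widenA s blank L).getD i ""
      = cellB s (s.foldl (fun m l => max m l.toList.length) 0)
          (pvStrRepeat blank (s.foldl (fun m l => max m l.toList.length) 0)) i := by
  unfold widenA cellB pvLjust pvStrRepeat
  set w := s.foldl (fun m l => max m l.toList.length) 0 with hw
  by_cases hil : i < s.length
  · have hlp : i < (s.map (fun l => String.mk (l.toList ++ List.replicate (w - l.toList.length) ' '))).length := by
      simpa using hil
    by_cases hc : L > (s.map (fun l => String.mk (l.toList ++ List.replicate (w - l.toList.length) ' '))).length
    · simp only [if_pos hc]
      rw [List.getD_eq_getElem _ _ (by simp; simp at hc; omega)]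
      rw [List.getElem_append_left hlp]
      simp [hil, List.getD_eq_getElem _ _ hil]
    · simp only [if_neg hc]
      rw [List.getD_eq_getElem _ _ hlp]
      simp [hil, List.getD_eq_getElem _ _ hil]
  · have hln : s.length < L := by omega
    have hc : L > (s.map (fun l => String.mk (l.toList ++ List.replicate (w - l.toList.length) ' '))).length := by
      simpa using hln
    simp only [if_pos hc]
    have hlen : (s.map (fun l => String.mk (l.toList ++ List.replicate (w - l.toList.length) ' '))).length = s.length := by simp
    rw [List.getD_eq_getElem _ _ (by simp; omega)]
    rw [List.getElem_append_right (by omega)]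
    simp [hil]

-- fold of min over a list of constants
theorem foldl_min_const (xs : List (List String)) (L : Nat)
    (h : ∀ x ∈ xs, x.length = L) (init : Nat) (hinit : init ≤ L) :
    xs.foldl (fun m x => min m x.length) init = init := by
  induction xs generalizing init with
  | nil => rfl
  | cons x t ih =>
    simp only [List.foldl_cons]
    have hx : x.length = L := h x (by simp)
    have : min init x.length = init := by omega
    rw [this]
    exact ih (fun y hy => h y (by simp [hy])) init hinit

theorem zip3_map_self {α β γ δ : Type} (xs : List α) (f : α → β) (g : β → γ) (h : (α × β) × γ → δ) :
    ((xs.zip (xs.map f)).zip ((xs.map f).map g)).map h = xs.map (fun x => h ((x, f x), g (f x))) := by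
  induction xs with
  | nil => rfl
  | cons x t ih => simp only [List.map_cons, List.zip_cons_cons]; rw [ih]

-- the else-branch core: transpose of widened blocks = row-major construction
theorem core_eq (splits : List (List String)) (blank gutter : String) :
    (pyZipStar (splits.map (fun s => widenA s blank (splits.foldl (fun m s => max m s.length) 0)))).map
        (fun row => PySem.Str.join gutter row)
    = (List.range (splits.foldl (fun m s => max m s.length) 0)).map
        (fun i => PySem.Str.join gutter
          (((splits.zip (splits.map (fun s => s.foldl (fun m l => max m l.toList.length) 0))).zip
              ((splits.map (fun s => s.foldl (fun m l => max m l.toList.length) 0)).map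
                (fun w => String.mk ((List.replicate w blank.toList).flatten)))).map
            (fun swb => cellB swb.1.1 swb.1.2 swb.2 i))) := by
  rcases splits with _ | ⟨x, rest⟩
  · simp [pyZipStar]
  set splits := x :: rest with hsp
  set L := splits.foldl (fun m s => max m s.length) 0 with hL
  have hlen : ∀ s ∈ splits, s.length ≤ L := le_foldl_max_len splits
  have hn : (rest.map (fun s => widenA s blank L)).foldl (fun m xs => min m xs.length)
      ((widenA x blank L).length) = L := by
    rw [length_widenA x blank L (hlen x (by simp [hsp]))]
    exact foldl_min_const _ L (fun y hy => by
      rcases List.mem_map.mp hy with ⟨s, hs, rfl⟩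
      exact length_widenA s blank L (hlen s (by simp [hsp, hs]))) L le_rfl
  rw [hsp, List.map_cons]
  simp only [pyZipStar]
  rw [hn, List.map_map]
  apply List.map_congr_left
  intro i hi
  have hiL : i < L := List.mem_range.mp hi
  simp only [Function.comp]
  congr 1
  rw [show (widenA x blank L :: rest.map (fun s => widenA s blank L))
        = (x :: rest).map (fun s => widenA s blank L) from rfl,
      List.map_map,
      zip3_map_self (x :: rest) (fun s => s.foldl (fun m l => max m l.toList.length) 0)
        (fun w => String.mk ((List.replicate w blank.toList).flatten))
        (fun swb => cellB swb.1.1 swb.1.2 swb.2 i)]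
  apply List.map_congr_left
  intro s hs
  exact getD_widenA s blank L i (hlen s (by rw [hsp]; exact hs)) hiL

-- ===== VERDICT (by name: the statement is the Claim_ definition above) =====
theorem joinFormattedArrays_py_spec : Claim_equal_joinFormattedArrays_py := by
  intro arrFmt newline squeeze blank gutter _ _
  unfold Spec_joinFormattedArrays_py joinFormattedArrays_py joinFormattedArrays_py_alt
  by_cases h0 : arrFmt.length = 0
  · simp [h0]
  by_cases h1 : arrFmt.length = 1
  · simp [h0, h1]
  cases squeeze with
  | true => simp [h0, h1]
  | false =>
    simp only [if_neg h0, if_neg h1, Bool.false_eq_true, if_false]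
    exact congrArg _ (core_eq (arrFmt.map (fun a => (PySem.Str.split? a newline).getD [a])) blank gutter)
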